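-- pv_equiv track=rewrite | github.com/wkumagai/cost-aware-research-search | logs/runs/20260311_220218/iter_03_experiment.py | count_rule_violations
-- ===== SOURCE A (Python) =====
-- def count_rule_violations(tokens, boundary_token):
--     """Parse errors: leading/trailing boundary tokens etc."""
--     violation = 0
--     if tokens[0] == boundary_token:
--         violation += 1
--     if tokens[-1] != boundary_token:
--         violation += 1
--     for i in range(1,len(tokens)):
--         if tokens[i]==boundary_token and tokens[i-1]==boundary_token:
--             violation += 1
--     return violation
-- ===== SOURCE B (Python) =====
-- def count_rule_violations(tokens, boundary_token):
--     """Parse errors: leading/trailing boundary tokens etc."""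
--     violation = int(tokens[0] == boundary_token) + int(tokens[-1] != boundary_token)
--     i, n = 0, len(tokens)
--     while i < n:
--         j = i + 1
--         while j < n and tokens[j] == tokens[i]:
--             j += 1
--         if tokens[i] == boundary_token:
--             violation += (j - i) - 1
--         i = j
--     return violation
-- ===== Notes on version B (the rewrite author's own statement) =====
-- stated objective: alternative
-- what changed: Replaced A's index-by-index neighbour-comparison loop with a run-based pass that jumps over each maximal run of equal tokens and adds (run length - 1) for runs equal to the boundary token; the two edge checks stay literal.
import Mathlib
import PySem

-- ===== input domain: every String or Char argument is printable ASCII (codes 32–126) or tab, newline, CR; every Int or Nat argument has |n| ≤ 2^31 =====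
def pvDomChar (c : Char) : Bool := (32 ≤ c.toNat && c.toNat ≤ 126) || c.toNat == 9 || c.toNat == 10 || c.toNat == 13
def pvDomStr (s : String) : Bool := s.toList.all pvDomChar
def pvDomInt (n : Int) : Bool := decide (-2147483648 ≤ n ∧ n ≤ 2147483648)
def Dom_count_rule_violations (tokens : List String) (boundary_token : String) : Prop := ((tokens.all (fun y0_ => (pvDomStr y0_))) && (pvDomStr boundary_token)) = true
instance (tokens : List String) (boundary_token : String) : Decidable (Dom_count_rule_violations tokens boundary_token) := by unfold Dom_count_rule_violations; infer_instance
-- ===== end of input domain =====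

-- B replaces A's index-by-index neighbour comparison with a run-based pass: it jumps over
-- maximal runs of equal tokens and adds (run length - 1) for each boundary run (objective:
-- alternative decomposition, same cost).

-- ===== PORT A =====
def count_rule_violations (tokens : List String) (boundary_token : String) : Int :=
  let violation : Int := 0
  let violation := if PySem.List.pyGetD tokens 0 "" == boundary_token then violation + 1 else violation
  let violation := if PySem.List.pyGetD tokens (-1) "" != boundary_token then violation + 1 else violation
  (PySem.List.pyRange 1 (tokens.length : Int) 1).foldl
    (fun v i =>
      if PySem.List.pyGetD tokens i "" == boundary_token
          && PySem.List.pyGetD tokens (i - 1) "" == boundary_token then v + 1 else v)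
    violation

-- ===== PORT B =====
-- the outer while loop of Source B: consume one maximal run of equal tokens per step
def pvRunLoop (xs : List String) (b : String) : Int :=
  match xs with
  | [] => 0
  | x :: t =>
    let run := t.takeWhile (fun y => y == x)
    let rest := t.dropWhile (fun y => y == x)
    (if x == b then (run.length : Int) else 0) + pvRunLoop rest b
termination_by xs.length
decreasing_by
  simp only [List.length_cons]
  exact Nat.lt_succ_of_le (List.length_dropWhile_le _ _)

def count_rule_violations_alt (tokens : List String) (boundary_token : String) : Int :=
  (if PySem.List.pyGetD tokens 0 "" == boundary_token then (1 : Int) else 0)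
  + (if PySem.List.pyGetD tokens (-1) "" != boundary_token then (1 : Int) else 0)
  + pvRunLoop tokens boundary_token

-- ===== PRECONDITION & SPEC =====
-- Pre_ excludes only the empty list, on which A raises IndexError (tokens[0]).
def Pre_count_rule_violations (tokens : List String) (boundary_token : String) : Prop := tokens ≠ []
instance (tokens : List String) (boundary_token : String) : Decidable (Pre_count_rule_violations tokens boundary_token) := by unfold Pre_count_rule_violations; infer_instance
def pvWitness_count_rule_violations : List String × String := (["a", "a", "b"], "a")

def Spec_count_rule_violations (tokens : List String) (boundary_token : String) (out : Int) : Prop := out = count_rule_violations_alt tokens boundary_token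
instance (tokens : List String) (boundary_token : String) (out : Int) : Decidable (Spec_count_rule_violations tokens boundary_token out) := by unfold Spec_count_rule_violations; infer_instance

-- ===== CLAIM (what is proved, stated in full; the proofs are below) =====
def Claim_equal_count_rule_violations : Prop := ∀ (tokens : List String) (boundary_token : String), Dom_count_rule_violations tokens boundary_token → Pre_count_rule_violations tokens boundary_token → Spec_count_rule_violations tokens boundary_token (count_rule_violations tokens boundary_token)

-- ===== LEMMAS AND PROOFS =====

-- reference count of adjacent boundary-boundary pairs
def pairCount : List String → String → Int
  | x :: y :: t, b => (if y == b && x == b then 1 else 0) + pairCount (y :: t) b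
  | _, _ => 0

lemma pairCount_run_split (xs : List String) (x b : String) :
    pairCount (x :: xs) b
      = (if x == b then ((xs.takeWhile (fun y => y == x)).length : Int) else 0)
          + pairCount (xs.dropWhile (fun y => y == x)) b := by
  induction xs generalizing x with
  | nil => simp [pairCount]
  | cons y t ih =>
    by_cases hyx : (y == x) = true
    · have hy : y = x := by simpa using hyx
      subst hy
      rw [show pairCount (y :: y :: t) b
            = (if y == b && y == b then 1 else 0) + pairCount (y :: t) b from rfl]
      rw [ih y]
      simp only [List.takeWhile_cons, List.dropWhile_cons, beq_self_eq_true, if_pos rfl]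
      by_cases hb : (y == b) = true <;> simp [hb] <;> push_cast <;> ring
    · have h0 : (if y == b && x == b then (1:Int) else 0) = 0 := by
        by_cases hyb : (y == b) = true
        · by_cases hxb : (x == b) = true
          · exfalso
            apply hyx
            have h1 : y = b := by simpa using hyb
            have h2 : x = b := by simpa using hxb
            simp [h1, h2]
          · simp [hxb]
        · simp [hyb]
      rw [show pairCount (x :: y :: t) b
            = (if y == b && x == b then 1 else 0) + pairCount (y :: t) b from rfl]
      simp [List.dropWhile_cons, hyx]
      intro hy hx
      exact hyx (by simp [hy, hx])

lemma pvRunLoop_eq_pairCount (xs : List String) (b : String) :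
    pvRunLoop xs b = pairCount xs b := by
  induction hn : xs.length using Nat.strong_induction_on generalizing xs with
  | _ n ih =>
    match xs with
    | [] => simp [pvRunLoop, pairCount]
    | x :: t =>
      rw [pvRunLoop, pairCount_run_split]
      have hlt : (t.dropWhile (fun y => y == x)).length < n := by
        subst hn
        simp only [List.length_cons]
        exact Nat.lt_succ_of_le (List.length_dropWhile_le _ _)
      rw [ih _ hlt _ rfl]

-- A's loop over Nat indices
lemma foldNat_eq (xs : List String) (b : String) :
    ∀ v : Int,
      (List.range (xs.length - 1)).foldl
        (fun acc k => if xs.getD (k + 1) "" == b && xs.getD k "" == b then acc + 1 else acc) v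
      = v + pairCount xs b := by
  induction xs with
  | nil => intro v; simp [pairCount]
  | cons x t iht =>
    match t, iht with
    | [], _ => intro v; simp [pairCount]
    | y :: t, iht =>
      intro v
      have hlen : (x :: y :: t).length - 1 = (y :: t).length - 1 + 1 := by
        simp
      rw [hlen, List.range_succ_eq_map, List.foldl_cons, List.foldl_map]
      have hstep :
          (List.range ((y :: t).length - 1)).foldl
            (fun acc k =>
              if (x :: y :: t).getD (k + 1 + 1) "" == b && (x :: y :: t).getD (k + 1) "" == b
              then acc + 1 else acc)
            (if (x :: y :: t).getD (0 + 1) "" == b && (x :: y :: t).getD 0 "" == b then v + 1 else v)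
          = (List.range ((y :: t).length - 1)).foldl
            (fun acc k => if (y :: t).getD (k + 1) "" == b && (y :: t).getD k "" == b then acc + 1 else acc)
            (if y == b && x == b then v + 1 else v) := by
        apply PySem.List.foldl_congr_mem
        intro acc k _
        rfl
      rw [hstep, iht]
      rw [show pairCount (x :: y :: t) b
            = (if y == b && x == b then 1 else 0) + pairCount (y :: t) b from rfl]
      by_cases h : (y == b && x == b) = true <;> simp [h] <;> ring

lemma foldA_eq (xs : List String) (b : String) (v : Int) :
    (PySem.List.pyRange 1 (xs.length : Int) 1).foldl
      (fun acc i =>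
        if PySem.List.pyGetD xs i "" == b && PySem.List.pyGetD xs (i - 1) "" == b
        then acc + 1 else acc) v
    = v + pairCount xs b := by
  rw [PySem.List.pyRange_one, List.foldl_map]
  have hcast : ((xs.length : Int) - 1).toNat = xs.length - 1 := by omega
  rw [hcast]
  have hcongr := PySem.List.foldl_congr_mem (l := List.range (xs.length - 1)) (init := v)
    (f := fun acc (k : Nat) =>
      if PySem.List.pyGetD xs (1 + (k : Int)) "" == b
          && PySem.List.pyGetD xs (1 + (k : Int) - 1) "" == b
      then acc + 1 else acc)
    (g := fun acc (k : Nat) => if xs.getD (k + 1) "" == b && xs.getD k "" == b then acc + 1 else acc)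
    (by
      intro acc k _
      have h1 : (1 : Int) + (k : Int) = ((k + 1 : Nat) : Int) := by push_cast; ring
      have h2 : (1 : Int) + (k : Int) - 1 = ((k : Nat) : Int) := by push_cast; ring
      have h3 : ((k + 1 : Nat) : Int) - 1 = ((k : Nat) : Int) := by push_cast; ring
      simp only [h1, h3, PySem.List.pyGetD_natCast])
  rw [hcongr, foldNat_eq]

-- ===== VERDICT (by name: the statement is the Claim_ definition above) =====
theorem count_rule_violations_spec : Claim_equal_count_rule_violations := by
  intro tokens boundary_token _ _
  unfold Spec_count_rule_violations count_rule_violations count_rule_violations_alt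
  rw [foldA_eq, pvRunLoop_eq_pairCount]
  split_ifs <;> ring
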